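-- pv_equiv track=rewrite | github.com/su-jith/pyth | py46.py | digits_even
-- ===== SOURCE A (Python) =====
-- def digits_even(num):
--     flag=0
--     while num>0:
--         d=num%10
--         if not d%2:
--             flag=1
--             break
--         num=num//10
--     if(flag==1):return 1
--     else:return 0
-- ===== SOURCE B (Python) =====
-- def digits_even(num):
--     if num <= 0:
--         return 0
--     return 1 if any(c in "02468" for c in str(num)) else 0
-- ===== Notes on version B (the rewrite author's own statement) =====
-- stated objective: idiomatic
-- what changed: Replaces the arithmetic digit-extraction while-loop (num % 10, num // 10 with a break flag) by a guard plus a short-circuiting any() over the decimal string of num, testing each character against '02468'.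
import Mathlib
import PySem

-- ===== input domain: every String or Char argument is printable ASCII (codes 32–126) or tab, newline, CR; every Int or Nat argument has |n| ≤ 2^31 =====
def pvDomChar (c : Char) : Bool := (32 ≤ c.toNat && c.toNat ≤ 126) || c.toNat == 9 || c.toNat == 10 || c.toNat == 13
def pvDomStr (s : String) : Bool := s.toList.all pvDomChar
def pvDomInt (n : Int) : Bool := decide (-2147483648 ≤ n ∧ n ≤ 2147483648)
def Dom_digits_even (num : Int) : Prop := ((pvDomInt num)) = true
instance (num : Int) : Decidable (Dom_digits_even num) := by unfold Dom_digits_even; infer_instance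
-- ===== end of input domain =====

-- B replaces A's arithmetic digit-extraction loop by a guard plus any() over the
-- decimal string, for idiomatic clarity; return values are proved identical.

-- ===== PORT A =====
-- the while-loop with its break/flag: break with flag=1 ↦ return 1, normal exit ↦ return 0
def digits_even (num : Int) : Int :=
  if h : 0 < num then
    if PySem.Int.mod (PySem.Int.mod num 10) 2 == 0 then 1
    else digits_even (PySem.Int.floordiv num 10)
  else 0
termination_by num.toNat
decreasing_by
  have h10 : PySem.Int.floordiv num 10 = num / 10 :=
    PySem.Int.floordiv_eq_ediv_of_pos (by omega)
  rw [h10]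
  omega

-- ===== PORT B =====
def digits_even_alt (num : Int) : Int :=
  if num ≤ 0 then 0
  else if (PySem.Int.toStr num).toList.any (fun c => ("02468".toList).contains c) then 1
  else 0

-- ===== PRECONDITION & SPEC =====
def Spec_digits_even (num : Int) (out : Int) : Prop := out = digits_even_alt num
instance (num : Int) (out : Int) : Decidable (Spec_digits_even num out) := by unfold Spec_digits_even; infer_instance

-- ===== CLAIM (what is proved, stated in full; the proofs are below) =====
def Claim_equal_digits_even : Prop := ∀ (num : Int), Dom_digits_even num → Spec_digits_even num (digits_even num)

-- ===== LEMMAS AND PROOFS =====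

-- common arithmetic characterisation both ports are reduced to
def hasEvenDigit (n : Nat) : Bool := (Nat.digits 10 n).any (fun d => d % 2 == 0)

lemma toDigitsCore_eq_digits (f : Nat) : ∀ (n : Nat) (acc : List Char), n < f → 0 < n →
    Nat.toDigitsCore 10 f n acc = ((Nat.digits 10 n).map Nat.digitChar).reverse ++ acc := by
  induction f with
  | zero => intro n acc h; omega
  | succ f ih =>
    intro n acc hf hn
    rw [Nat.toDigitsCore]
    by_cases h0 : n / 10 = 0
    · simp only [h0, if_true]
      rw [Nat.digits_def' (by norm_num) hn, h0]
      simp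
    · simp only [h0, if_false]
      rw [ih (n / 10) _ (by omega) (by omega)]
      rw [Nat.digits_def' (by norm_num) hn]
      simp

lemma digitChar_even (d : Nat) (hd : d < 10) :
    ("02468".toList).contains (Nat.digitChar d) = (d % 2 == 0) := by
  interval_cases d <;> decide

lemma any_map_digitChar (l : List Nat) (hl : ∀ d ∈ l, d < 10) :
    (l.map Nat.digitChar).any (fun c => ("02468".toList).contains c)
      = l.any (fun d => d % 2 == 0) := by
  induction l with
  | nil => rfl
  | cons d l ih =>
    simp only [List.map_cons, List.any_cons,
      digitChar_even d (hl d (by simp)), ih (fun x hx => hl x (by simp [hx]))]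

lemma digits_even_eq (num : Int) :
    digits_even num = if hasEvenDigit num.toNat then 1 else 0 := by
  generalize hk : num.toNat = k
  induction k using Nat.strong_induction_on generalizing num with
  | _ k ih =>
    rw [digits_even]
    by_cases h : 0 < num
    · have hmod : PySem.Int.mod num 10 = num % 10 :=
        PySem.Int.mod_eq_emod_of_pos (by omega)
      have hm2 : PySem.Int.mod (num % 10) 2 = (num % 10) % 2 :=
        PySem.Int.mod_eq_emod_of_pos (by omega)
      have hdiv : PySem.Int.floordiv num 10 = num / 10 :=
        PySem.Int.floordiv_eq_ediv_of_pos (by omega)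
      have hkpos : 0 < k := by omega
      have hdig : Nat.digits 10 k = k % 10 :: Nat.digits 10 (k / 10) :=
        Nat.digits_def' (by norm_num) hkpos
      have hnum : num = (k : Int) := by omega
      simp only [dif_pos h, hmod, hm2, hdiv]
      by_cases he : (num % 10) % 2 = 0
      · have : ((num % 10) % 2 == 0) = true := by
          rw [he]; rfl
        simp only [this]
        have : (k % 10) % 2 = 0 := by omega
        simp [hasEvenDigit, hdig, this]
      · have hne : ((num % 10) % 2 == 0) = false := by
          simpa using he
        simp only [hne]
        have hlt : (num / 10).toNat < k := by omega
        have hrec := ih (num / 10).toNat hlt (num / 10) rfl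
        simp only [Bool.false_eq_true, if_false, hrec]
        have hq : (num / 10).toNat = k / 10 := by omega
        have hd2 : ¬ k % 2 = 0 := by omega
        simp [hasEvenDigit, hdig, hq, hd2]
    · have : num.toNat = 0 := by omega
      simp [dif_neg h, hasEvenDigit, hk ▸ this]

lemma digits_even_alt_eq (num : Int) :
    digits_even_alt num = if hasEvenDigit num.toNat then 1 else 0 := by
  unfold digits_even_alt
  by_cases h : num ≤ 0
  · have : num.toNat = 0 := by omega
    simp [h, this, hasEvenDigit]
  · have hpos : 0 < num := by omega
    have hchars : (PySem.Int.toStr num).toList = PySem.Int.toChars num :=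
      PySem.Int.toList_toStr num
    have htc : PySem.Int.toChars num = Nat.toDigits 10 num.toNat := by
      unfold PySem.Int.toChars
      rw [if_neg (by omega)]
    have hnpos : 0 < num.toNat := by omega
    rw [if_neg h, hchars, htc, Nat.toDigits,
      toDigitsCore_eq_digits (num.toNat + 1) num.toNat [] (by omega) hnpos]
    rw [List.append_nil, List.any_reverse,
      any_map_digitChar _ (fun d hd => Nat.digits_lt_base (by norm_num) hd)]
    rfl

-- ===== VERDICT (by name: the statement is the Claim_ definition above) =====
theorem digits_even_spec : Claim_equal_digits_even := by
  intro num _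
  unfold Spec_digits_even
  rw [digits_even_eq, digits_even_alt_eq]
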